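-- pv_equiv track=rewrite | github.com/pruthvianveshmuga/dsa | valid-word-abbreviation.py | solution1
-- ===== SOURCE A (Python) =====
-- def solution1(word, abbr):
--     i_abbr, i_word = 0, 0
--     while i_abbr < len(abbr):
--         if abbr[i_abbr:i_abbr+1].isnumeric():
--             if int(abbr[i_abbr:i_abbr+1]) == 0:
--                 return False
--             start, end = i_abbr, i_abbr+1
--             while end <= len(abbr) and abbr[start:end].isnumeric():
--                 end += 1
--             end -= 1
--             abbr_len = int(abbr[start:end])
--
--             i_word += abbr_len
--             i_abbr = end
--         else:
--             if i_word >= len(word) or word[i_word] != abbr[i_abbr]: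
--                 return False
--             i_word += 1
--             i_abbr += 1
--     if i_word != len(word):
--         return False
--     return True
-- ===== SOURCE B (Python) =====
-- def _runs(s):
--     # split s into maximal runs of numeric / non-numeric characters
--     res = []
--     while s:
--         key = s[0].isnumeric()
--         j = 1
--         while j < len(s) and s[j].isnumeric() == key:
--             j += 1
--         res.append(s[:j])
--         s = s[j:]
--     return res
--
--
-- def solution1(word, abbr):
--     i = 0
--     for run in _runs(abbr):
--         if run[0].isnumeric():
--             if run[0] == '0':
--                 return False
--             i += int(run)
--         else:
--             if word[i:i+len(run)] != run:
--                 return False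
--             i += len(run)
--     return i == len(word)
-- ===== Notes on version B (the rewrite author's own statement) =====
-- stated objective: alternative
-- what changed: A interleaves numeric-run scanning (repeated slice.isnumeric checks) and character matching inside one two-pointer while loop; B first splits the abbreviation into maximal numeric/non-numeric runs and then folds over that token list with a single word index, comparing letter runs by slice equality.
import Mathlib
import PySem

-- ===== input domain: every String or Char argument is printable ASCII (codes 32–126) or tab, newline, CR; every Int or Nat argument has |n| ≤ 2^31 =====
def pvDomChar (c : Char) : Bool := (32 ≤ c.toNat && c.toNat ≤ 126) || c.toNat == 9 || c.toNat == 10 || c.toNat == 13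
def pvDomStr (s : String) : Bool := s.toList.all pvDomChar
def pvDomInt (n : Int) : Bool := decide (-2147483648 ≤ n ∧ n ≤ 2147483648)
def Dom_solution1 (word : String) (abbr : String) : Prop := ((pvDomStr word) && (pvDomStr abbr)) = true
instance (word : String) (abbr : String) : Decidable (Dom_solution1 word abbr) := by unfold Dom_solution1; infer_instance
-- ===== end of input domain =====

-- B re-groups the abbreviation into maximal numeric/non-numeric runs first and then folds
-- over that token list with a single word index (objective: a different, plainer decomposition;
-- same cost).  Python's str.isnumeric coincides with str.isdigit on the ASCII domain Dom, so it
-- is ported as PySem.Chars.isdigit / strIsdigit (exact on Dom).  The `fuel` parameters below are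
-- pure totality guards (always called with enough fuel); they encode no algorithmic choice.

-- ===== PORT A =====

-- inner while of A: `while end <= len(abbr) and abbr[start:end].isnumeric(): end += 1`
def innerA (a : List Char) (start : Nat) : Nat → Nat → Nat
  | 0, e => e  -- fuel exhausted (unreachable: called with fuel a.length + 1)
  | fuel + 1, e =>
    if e ≤ a.length ∧ PySem.Chars.strIsdigit (PySem.List.slice a (some (start : Int)) (some (e : Int))) = true then
      innerA a start fuel (e + 1)
    else e

-- outer while of A (i_abbr, i_word); the digit run is re-read with int() exactly as A does.
-- i_word stays a Nat: A only ever adds int() values of digit strings, which are ≥ 0.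
def loopA (w a : List Char) : Nat → Nat → Nat → Bool
  | 0, _, _ => false  -- fuel exhausted (unreachable: i_abbr advances every iteration)
  | fuel + 1, ia, iw =>
    if ia < a.length then
      if PySem.Chars.strIsdigit (PySem.List.slice a (some (ia : Int)) (some ((ia : Int) + 1))) = true then
        if (PySem.Int.ofChars? (PySem.List.slice a (some (ia : Int)) (some ((ia : Int) + 1)))).getD 0 == 0 then
          false
        else
          loopA w a fuel (innerA a ia (a.length + 1) (ia + 1) - 1)
            (iw + ((PySem.Int.ofChars? (PySem.List.slice a (some (ia : Int)) (some ((innerA a ia (a.length + 1) (ia + 1) - 1 : Nat) : Int)))).getD 0).toNat)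
      else
        if iw ≥ w.length || !(w[iw]? == a[ia]?) then false
        else loopA w a fuel (ia + 1) (iw + 1)
    else iw == w.length

def solution1 (word : String) (abbr : String) : Bool :=
  loopA word.toList abbr.toList (abbr.toList.length + 1) 0 0

-- ===== PORT B =====

-- Source B's inner while: length of the maximal run with digit-class `key` (scan from index j)
def runLen (s : List Char) (key : Bool) : Nat → Nat → Nat
  | 0, j => j  -- fuel exhausted (unreachable: called with fuel s.length)
  | fuel + 1, j =>
    if j < s.length ∧ (PySem.Chars.isdigit s[j]! == key) = true then runLen s key fuel (j + 1)
    else j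

-- Source B's _runs: split into maximal runs of numeric / non-numeric characters
def runsOf : Nat → List Char → List (List Char)
  | 0, _ => []  -- fuel exhausted (unreachable: called with fuel s.length, each step drops ≥ 1 char)
  | fuel + 1, s =>
    match s with
    | [] => []
    | c :: _ =>
      let j := runLen s (PySem.Chars.isdigit c) s.length 1
      s.take j :: runsOf fuel (s.drop j)

-- Source B's main for-loop over the runs, maintaining the word index i
def foldB (w : List Char) : List (List Char) → Nat → Bool
  | [], iw => iw == w.length
  | run :: rs, iw =>
    match run with
    | [] => false  -- unreachable: runsOf only produces nonempty runs
    | c :: _ =>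
      if PySem.Chars.isdigit c then
        if c == '0' then false
        else foldB w rs (iw + ((PySem.Int.ofChars? run).getD 0).toNat)
      else
        if PySem.List.slice w (some (iw : Int)) (some ((iw : Int) + (run.length : Int))) == run then
          foldB w rs (iw + run.length)
        else false

def solution1_alt (word : String) (abbr : String) : Bool :=
  foldB word.toList (runsOf abbr.toList.length abbr.toList) 0

-- ===== PRECONDITION & SPEC =====
def Spec_solution1 (word : String) (abbr : String) (out : Bool) : Prop := out = solution1_alt word abbr
instance (word : String) (abbr : String) (out : Bool) : Decidable (Spec_solution1 word abbr out) := by unfold Spec_solution1; infer_instance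

-- ===== CLAIM (what is proved, stated in full; the proofs are below) =====
def Claim_equal_solution1 : Prop := ∀ (word : String) (abbr : String), Dom_solution1 word abbr → Spec_solution1 word abbr (solution1 word abbr)

-- ===== LEMMAS AND PROOFS =====

theorem take_len_takeWhile {α : Type} (p : α → Bool) (t : List α) :
    t.take (t.takeWhile p).length = t.takeWhile p := by
  induction t with
  | nil => rfl
  | cons x xs ih =>
    by_cases h : p x
    · simp [h, ih]
    · simp [h]

theorem drop_len_takeWhile {α : Type} (p : α → Bool) (t : List α) :
    t.drop (t.takeWhile p).length = t.dropWhile p := by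
  induction t with
  | nil => rfl
  | cons x xs ih =>
    by_cases h : p x
    · simp [h, ih]
    · simp [h]

theorem next_after_takeWhile {α : Type} [Inhabited α] (p : α → Bool) (t : List α)
    (h : (t.takeWhile p).length < t.length) : p (t[(t.takeWhile p).length]!) = false := by
  induction t with
  | nil => simp at h
  | cons x xs ih =>
    by_cases hp : p x
    · simp only [List.takeWhile_cons, hp, if_true, List.length_cons] at h ⊢
      simpa using ih (by omega)
    · simp [hp]

theorem runLen_eq (s : List Char) (key : Bool) : ∀ (fuel j : Nat), s.length ≤ j + fuel →
    runLen s key fuel j = j + ((s.drop j).takeWhile (fun x => PySem.Chars.isdigit x == key)).length := by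
  intro fuel
  induction fuel with
  | zero =>
    intro j hj
    rw [runLen, List.drop_eq_nil_of_le (by omega)]
    simp
  | succ fuel ih =>
    intro j hj
    rw [runLen]
    by_cases h : j < s.length ∧ (PySem.Chars.isdigit s[j]! == key) = true
    · rw [if_pos h]
      obtain ⟨hjl, hk⟩ := h
      rw [List.drop_eq_getElem_cons hjl, List.takeWhile_cons]
      have hgg : s[j]! = s[j] := by
        simp [List.getElem!_eq_getElem?_getD, List.getElem?_eq_getElem hjl]
      rw [hgg] at hk
      rw [ih (j + 1) (by omega)]
      simp only [hk, if_true, List.length_cons]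
      omega
    · rw [if_neg h]
      rcases Nat.lt_or_ge j s.length with hjl | hjl
      · have hk : (PySem.Chars.isdigit s[j] == key) = false := by
          have hgg : s[j]! = s[j] := by
            simp [List.getElem!_eq_getElem?_getD, List.getElem?_eq_getElem hjl]
          rcases Bool.eq_false_or_eq_true (PySem.Chars.isdigit s[j] == key) with ht | hf
          · exact absurd ⟨hjl, hgg ▸ ht⟩ h
          · exact hf
        rw [List.drop_eq_getElem_cons hjl, List.takeWhile_cons, hk]
        simp
      · rw [List.drop_eq_nil_of_le hjl]
        simp

theorem runsOf_cons (m : Nat) (c : Char) (t : List Char) :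
    runsOf (m + 1) (c :: t) = (c :: t.takeWhile (fun x => PySem.Chars.isdigit x == PySem.Chars.isdigit c))
      :: runsOf m (t.dropWhile (fun x => PySem.Chars.isdigit x == PySem.Chars.isdigit c)) := by
  rw [runsOf]
  have hr := runLen_eq (c :: t) (PySem.Chars.isdigit c) (c :: t).length 1 (by simp)
  have hd : (c :: t).drop 1 = t := rfl
  rw [hd] at hr
  rw [hr]
  have h1 : (1 + (List.takeWhile (fun x => PySem.Chars.isdigit x == PySem.Chars.isdigit c) t).length)
      = (List.takeWhile (fun x => PySem.Chars.isdigit x == PySem.Chars.isdigit c) t).length + 1 := by omega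
  rw [h1, List.take_succ_cons, List.drop_succ_cons,
    take_len_takeWhile, drop_len_takeWhile]

theorem innerA_eq (a : List Char) (start : Nat) (hs : start < a.length) :
    ∀ (fuel e : Nat), start + 1 ≤ e → e ≤ start + ((a.drop start).takeWhile PySem.Chars.isdigit).length + 1 →
      start + ((a.drop start).takeWhile PySem.Chars.isdigit).length + 1 ≤ e + fuel →
      innerA a start fuel e = start + ((a.drop start).takeWhile PySem.Chars.isdigit).length + 1 := by
  set l := a.drop start with hl
  set D := (l.takeWhile PySem.Chars.isdigit).length with hD
  have hDlen : D ≤ l.length := (List.takeWhile_prefix _).length_le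
  have hllen : l.length = a.length - start := by simp [hl]
  have hexit : ∀ fuel, innerA a start fuel (start + D + 1) = start + D + 1 := by
    intro fuel
    cases fuel with
    | zero => rfl
    | succ fuel =>
      rw [innerA, if_neg]
      rintro ⟨hle, hdig⟩
      have hDl : D < l.length := by omega
      have hslice : PySem.List.slice a (some (start : Int)) (some ((start + D + 1 : Nat) : Int)) = l.take (D + 1) := by
        rw [PySem.List.slice_natCast, ← hl]
        congr 1
        omega
      rw [hslice] at hdig
      have hbad : PySem.Chars.isdigit (l[D]'hDl) = false := by
        have := next_after_takeWhile PySem.Chars.isdigit l (by omega)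
        rwa [List.getElem!_eq_getElem?_getD, List.getElem?_eq_getElem hDl] at this
      have hmem : l[D]'hDl ∈ l.take (D + 1) := by
        have h1 : D < (l.take (D + 1)).length := by simp [List.length_take]; omega
        have h2 : (l.take (D + 1))[D]'h1 = l[D]'hDl := List.getElem_take
        exact h2 ▸ List.getElem_mem h1
      rw [PySem.Chars.strIsdigit] at hdig
      simp only [Bool.and_eq_true, List.all_eq_true] at hdig
      have := hdig.2 _ hmem
      rw [hbad] at this
      exact Bool.false_ne_true this
  intro fuel
  induction fuel with
  | zero =>
    intro e he1 he2 he3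
    have hee : e = start + D + 1 := by omega
    rw [hee]
    exact hexit 0
  | succ fuel ih =>
    intro e he1 he2 he3
    rcases Nat.eq_or_lt_of_le he2 with hee | hlt
    · rw [hee]
      exact hexit (fuel + 1)
    have heD : e ≤ start + D := by omega
    rw [innerA, if_pos]
    · exact ih (e + 1) (by omega) (by omega) (by omega)
    refine ⟨by omega, ?_⟩
    have hslice : PySem.List.slice a (some (start : Int)) (some (e : Int)) = l.take (e - start) := by
      rw [PySem.List.slice_natCast, ← hl]
    rw [hslice, PySem.Chars.strIsdigit]
    simp only [Bool.and_eq_true, List.all_eq_true]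
    constructor
    · simp only [Bool.not_eq_true', List.isEmpty_eq_false_iff, ← List.length_pos_iff]
      simp [List.length_take]
      omega
    · intro x hx
      have hsub : l.take (e - start) = (l.takeWhile PySem.Chars.isdigit).take (e - start) := by
        conv_rhs => rw [← take_len_takeWhile PySem.Chars.isdigit l, List.take_take]
        congr 1
        omega
      rw [hsub] at hx
      exact List.mem_takeWhile_imp (List.take_subset _ _ hx)

theorem zero_check (c : Char) (h : PySem.Chars.isdigit c = true) :
    ((PySem.Int.ofChars? [c]).getD 0 == (0 : Int)) = (c == '0') := by
  have hb : 48 ≤ c.toNat ∧ c.toNat ≤ 57 := by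
    simp [PySem.Chars.isdigit, Char.le_def] at h
    exact ⟨h.1, h.2⟩
  have h10 : c.toNat = 48 ∨ c.toNat = 49 ∨ c.toNat = 50 ∨ c.toNat = 51 ∨ c.toNat = 52 ∨
      c.toNat = 53 ∨ c.toNat = 54 ∨ c.toNat = 55 ∨ c.toNat = 56 ∨ c.toNat = 57 := by omega
  have hc := Char.ofNat_toNat c
  rcases h10 with h0 | h0 | h0 | h0 | h0 | h0 | h0 | h0 | h0 | h0 <;>
    rw [← hc, h0] <;> decide

theorem foldB_letter_step (w : List Char) (c : Char) (ls : List Char) (rs : List (List Char)) (iw : Nat)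
    (hc : PySem.Chars.isdigit c = false) (hls : ∀ x ∈ ls, PySem.Chars.isdigit x = false) :
    foldB w ((c :: ls) :: rs) iw =
      if w[iw]? = some c then foldB w (if ls = [] then rs else ls :: rs) (iw + 1) else false := by
  have hget : w[iw]? = (w.drop iw)[0]? := by simp
  have hdrop1 : w.drop (iw + 1) = (w.drop iw).drop 1 := by rw [List.drop_drop]
  rw [foldB]
  simp only [hc, Bool.false_eq_true, if_false]
  rw [PySem.List.slice_natCast_add]
  cases hw : w.drop iw with
  | nil =>
    rw [hget, hw]
    simp
  | cons x t =>
    rw [hget, hw]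
    simp only [List.length_cons, List.take_succ_cons, List.getElem?_cons_zero]
    rcases eq_or_ne x c with hx | hx
    · subst hx
      rw [if_pos rfl]
      cases ls with
      | nil =>
        simp
      | cons c' ls' =>
        have hc' : PySem.Chars.isdigit c' = false := hls c' (by simp)
        rw [if_neg (by simp : ¬(c' :: ls' = [])), foldB]
        simp only [hc', Bool.false_eq_true, if_false]
        rw [PySem.List.slice_natCast_add, hdrop1, hw]
        simp only [List.drop_one, List.tail_cons, List.length_cons]
        have harith : iw + (ls'.length + 1 + 1) = iw + 1 + (ls'.length + 1) := by omega
        by_cases ht : t.take (ls'.length + 1) = c' :: ls'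
        · simp [ht, harith]
        · simp [ht]
    · rw [if_neg (by simp [hx]), if_neg (by simp [hx])]

theorem loopA_eq (w a : List Char) : ∀ (fuel fuel' ia iw : Nat), ia ≤ a.length →
    a.length + 1 ≤ ia + fuel → a.length - ia ≤ fuel' →
    loopA w a fuel ia iw = foldB w (runsOf fuel' (a.drop ia)) iw := by
  intro fuel
  induction fuel with
  | zero =>
    intro fuel' ia iw hia hn _
    omega
  | succ fuel ih =>
    intro fuel' ia iw hle hn hf
    by_cases hia : ia < a.length
    swap
    · rw [loopA, if_neg hia, List.drop_eq_nil_of_le (by omega)]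
      cases fuel' <;> rw [runsOf] <;> rfl
    have hdrop : a.drop ia = a[ia]'hia :: a.drop (ia + 1) := List.drop_eq_getElem_cons hia
    set c := a[ia]'hia with hcdef
    set t := a.drop (ia + 1) with htdef
    have hflen : (a.drop ia).length ≤ fuel' := by
      simp only [List.length_drop]
      omega
    obtain ⟨m, hm⟩ : ∃ m, fuel' = m + 1 := by
      cases fuel' with
      | zero => rw [hdrop] at hflen; simp at hflen
      | succ m => exact ⟨m, rfl⟩
    subst hm
    have hslice1 : PySem.List.slice a (some (ia : Int)) (some ((ia : Int) + 1)) = [c] := by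
      rw [show ((ia : Int) + 1) = ((ia : Int) + ((1 : Nat) : Int)) by norm_num,
        PySem.List.slice_natCast_add, hdrop]
      rfl
    rw [loopA, if_pos hia]
    by_cases h2 : PySem.Chars.strIsdigit (PySem.List.slice a (some (ia : Int)) (some ((ia : Int) + 1))) = true
    · -- digit branch
      rw [if_pos h2]
      have hc : PySem.Chars.isdigit c = true := by
        rw [hslice1] at h2
        revert h2
        simp [PySem.Chars.strIsdigit]
      rw [hdrop, runsOf_cons]
      have hpred : (fun x => PySem.Chars.isdigit x == PySem.Chars.isdigit c) = PySem.Chars.isdigit := by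
        funext x
        rw [hc]
        cases PySem.Chars.isdigit x <;> rfl
      rw [hpred]
      have htw : (a.drop ia).takeWhile PySem.Chars.isdigit = c :: t.takeWhile PySem.Chars.isdigit := by
        rw [hdrop, List.takeWhile_cons, hc]
        simp
      set D := ((a.drop ia).takeWhile PySem.Chars.isdigit).length with hDdef
      have hD1 : D = (t.takeWhile PySem.Chars.isdigit).length + 1 := by rw [hDdef, htw]; simp
      have hDlen : D ≤ (a.drop ia).length := (List.takeWhile_prefix _).length_le
      have hlen : (a.drop ia).length = a.length - ia := by simp
      have hinner : innerA a ia (a.length + 1) (ia + 1) = ia + D + 1 :=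
        innerA_eq a ia hia (a.length + 1) (ia + 1) (by omega) (by omega) (by omega)
      rw [hinner, Nat.add_sub_cancel]
      have hslice2 : PySem.List.slice a (some (ia : Int)) (some (((ia + D : Nat)) : Int)) =
          c :: t.takeWhile PySem.Chars.isdigit := by
        rw [show (((ia + D : Nat)) : Int) = ((ia : Int) + ((D : Nat) : Int)) by push_cast; ring,
          PySem.List.slice_natCast_add, ← htw, hDdef, take_len_takeWhile]
      rw [foldB]
      simp only [hc, if_true]
      rw [hslice1, zero_check c hc, hslice2]
      by_cases hz : (c == '0') = true
      · rw [if_pos hz, if_pos hz]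
      · rw [if_neg hz, if_neg hz]
        rw [ih m (ia + D) _ (by omega) (by omega) (by omega)]
        congr 1
        have hdd : a.drop (ia + D) = (a.drop ia).drop D := by
          rw [List.drop_drop, Nat.add_comm]
        rw [hdd, hdrop, hD1, List.drop_succ_cons, drop_len_takeWhile]
    · -- letter branch
      rw [if_neg h2]
      have hc : PySem.Chars.isdigit c = false := by
        rw [hslice1] at h2
        revert h2
        simp [PySem.Chars.strIsdigit]
      rw [hdrop, runsOf_cons]
      set ls := t.takeWhile (fun x => PySem.Chars.isdigit x == PySem.Chars.isdigit c) with hlsdef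
      have hls : ∀ x ∈ ls, PySem.Chars.isdigit x = false := by
        intro x hx
        have := List.mem_takeWhile_imp hx
        rw [hc] at this
        simpa using this
      rw [foldB_letter_step w c ls _ iw hc hls]
      have hga : a[ia]? = some c := by rw [List.getElem?_eq_getElem hia]
      by_cases hw : w[iw]? = some c
      · have hiw : iw < w.length := by
          rcases List.getElem?_eq_some_iff.mp hw with ⟨h, _⟩
          exact h
        have hcond : (iw ≥ w.length || !(w[iw]? == a[ia]?)) = false := by
          rw [hga, hw]
          simp
          omega
        rw [hcond, if_pos hw]
        simp only [Bool.false_eq_true, if_false]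
        cases htt : t with
        | nil =>
          rw [ih m (ia + 1) _ (by omega) (by omega) (by omega), ← htdef, htt]
          have hlse : ls = [] := by rw [hlsdef, htt]; rfl
          rw [if_pos hlse]
          rfl
        | cons c' t'' =>
          by_cases hp : PySem.Chars.isdigit c' = false
          · rw [ih (m + 1) (ia + 1) _ (by omega) (by omega) (by omega), ← htdef, htt]
            have hlsne : ls = c' :: t''.takeWhile (fun x => PySem.Chars.isdigit x == PySem.Chars.isdigit c) := by
              rw [hlsdef, htt, List.takeWhile_cons, hp, hc]
              simp
            rw [if_neg (by rw [hlsne]; simp), runsOf_cons, hlsne]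
            have hpred2 : (fun x => PySem.Chars.isdigit x == PySem.Chars.isdigit c') =
                (fun x => PySem.Chars.isdigit x == PySem.Chars.isdigit c) := by
              rw [hp, hc]
            rw [hpred2]
            congr 2
            simp [hp, hc]
          · rw [ih m (ia + 1) _ (by omega) (by omega) (by omega), ← htdef, htt]
            have hp' : PySem.Chars.isdigit c' = true := by simpa using hp
            have hlse : ls = [] := by
              rw [hlsdef, htt, List.takeWhile_cons]
              simp [hc, hp']
            rw [if_pos hlse]
            congr 2
            rw [List.dropWhile_cons]
            simp [hc, hp']
      · have hcond : (iw ≥ w.length || !(w[iw]? == a[ia]?)) = true := by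
          rw [hga]
          rcases Nat.lt_or_ge iw w.length with h | h
          · have : w[iw]? ≠ some c := hw
            simp [this]
          · simp
            omega
        rw [hcond, if_neg hw]
        simp

-- ===== VERDICT (by name: the statement is the Claim_ definition above) =====
theorem solution1_spec : Claim_equal_solution1 := by
  intro word abbr _
  unfold Spec_solution1 solution1 solution1_alt
  have := loopA_eq word.toList abbr.toList (abbr.toList.length + 1) abbr.toList.length 0 0
    (by omega) (by omega) (by omega)
  simpa using this
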